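-- pv_equiv track=rewrite | github.com/durandal42/projects | aoc/2024/day06.py | organize_obstacles
-- ===== SOURCE A (Python) =====
-- def organize_obstacles(obstacles):
--   num_rows = max(r for r, c in obstacles)+1
--   num_cols = max(c for r, c in obstacles)+1
--
--   obstacles_by_row = [[] for r in range(num_rows)]
--   obstacles_by_col = [[] for c in range(num_cols)]
--   for r, c in obstacles:
--     obstacles_by_row[r].append(c)
--     obstacles_by_col[c].append(r)
--   for l in obstacles_by_row:
--     l.sort()
--   for l in obstacles_by_col:
--     l.sort()
--
--   return obstacles_by_row, obstacles_by_col
-- ===== SOURCE B (Python) =====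
-- def _distribute(pairs, key, val):
--   d = {}
--   for p in pairs:
--     d.setdefault(key(p), []).append(val(p))
--   return d
--
--
-- def organize_obstacles(obstacles):
--   num_rows = max(r for r, c in obstacles) + 1
--   num_cols = max(c for r, c in obstacles) + 1
--   by_row = _distribute(sorted(obstacles), lambda p: p[0], lambda p: p[1])
--   by_col = _distribute(sorted(obstacles, key=lambda p: (p[1], p[0])),
--                        lambda p: p[1], lambda p: p[0])
--   return ([by_row.get(r, []) for r in range(num_rows)],
--           [by_col.get(c, []) for c in range(num_cols)])
-- ===== Notes on version B (the rewrite author's own statement) =====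
-- stated objective: alternative
-- what changed: A appends each obstacle into preallocated row/col buckets and then sorts every bucket; B sorts the obstacle list globally (by (r,c) and by (c,r)) and distributes it into dict buckets in one pass, so each bucket comes out sorted without any per-bucket sort.
-- outside the precondition, e.g. on organize_obstacles([(0, 0), (-1, 0)]): A returns ([[0, 0]], [[-1, 0]]), B returns ([[0]], [[-1, 0]])
import Mathlib
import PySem

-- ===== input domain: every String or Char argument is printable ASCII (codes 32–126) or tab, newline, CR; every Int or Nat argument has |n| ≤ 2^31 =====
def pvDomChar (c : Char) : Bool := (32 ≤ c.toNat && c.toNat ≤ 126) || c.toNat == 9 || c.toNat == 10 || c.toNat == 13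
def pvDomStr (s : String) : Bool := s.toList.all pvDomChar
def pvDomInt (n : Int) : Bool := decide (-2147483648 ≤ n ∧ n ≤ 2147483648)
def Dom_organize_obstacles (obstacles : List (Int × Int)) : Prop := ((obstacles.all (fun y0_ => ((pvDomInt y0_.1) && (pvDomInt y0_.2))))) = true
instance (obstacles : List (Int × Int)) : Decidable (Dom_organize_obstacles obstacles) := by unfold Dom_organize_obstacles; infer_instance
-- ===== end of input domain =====

-- B sorts the obstacles globally and distributes into dict buckets (one pass, buckets come out
-- sorted), instead of A's append-into-preallocated-buckets-then-sort-each-bucket.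

-- ===== PORT A =====
-- bs[i].append(x): Python list indexing (negative index wraps; out of range would be IndexError,
-- such inputs are outside Pre_ below, where the loop leaves bs unchanged)
def pyAppendAt (bs : List (List Int)) (i : Int) (x : Int) : List (List Int) :=
  let j : Int := if i < 0 then i + bs.length else i
  if 0 ≤ j ∧ j < bs.length then bs.modify j.toNat (fun l => l ++ [x]) else bs

def organize_obstacles (obstacles : List (Int × Int)) : List (List Int) × List (List Int) :=
  match PySem.List.max? (obstacles.map (fun p => p.1)) (fun x => x),
        PySem.List.max? (obstacles.map (fun p => p.2)) (fun x => x) with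
  | some mr, some mc =>
      let numRows : Int := mr + 1
      let numCols : Int := mc + 1
      let init : List (List Int) × List (List Int) :=
        ((PySem.List.pyRange 0 numRows 1).map (fun _ => []),
         (PySem.List.pyRange 0 numCols 1).map (fun _ => []))
      let st := obstacles.foldl
        (fun st p => (pyAppendAt st.1 p.1 p.2, pyAppendAt st.2 p.2 p.1)) init
      (st.1.map (fun l => PySem.List.sorted l (fun x => x) false),
       st.2.map (fun l => PySem.List.sorted l (fun x => x) false))
  | _, _ => ([], [])   -- unreachable under Pre_ (Python's max raises ValueError on an empty list)

-- ===== PORT B =====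
-- _distribute: d.setdefault(key(p), []).append(val(p)) over the pairs (= d[k] = d.get(k, []) + [v])
def distributeB (pairs : List (Int × Int)) (key val : Int × Int → Int) : PySem.Dict Int (List Int) :=
  pairs.foldl (fun d p => d.modify (key p) [] (fun l => l ++ [val p])) PySem.Dict.empty

def organize_obstacles_alt (obstacles : List (Int × Int)) : List (List Int) × List (List Int) :=
  match PySem.List.max? (obstacles.map (fun p => p.1)) (fun x => x) with
  | none => ([], [])
  | some mr =>
    match PySem.List.max? (obstacles.map (fun p => p.2)) (fun x => x) with
    | none => ([], [])
    | some mc =>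
      let byRow := distributeB (PySem.List.sorted2 obstacles (fun p => p.1) (fun p => p.2) false)
          (fun p => p.1) (fun p => p.2)
      let byCol := distributeB (PySem.List.sorted2 obstacles (fun p => p.2) (fun p => p.1) false)
          (fun p => p.2) (fun p => p.1)
      ((PySem.List.pyRange 0 (mr + 1) 1).map (fun r => byRow.getD r []),
       (PySem.List.pyRange 0 (mc + 1) 1).map (fun c => byCol.getD c []))

-- ===== PRECONDITION & SPEC =====
-- Pre_ excludes the empty list (A's max() raises ValueError) and lists with a negative coordinate,
-- which lie outside the natural grid domain: there A either raises IndexError or appends through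
-- Python's negative-index wraparound, an artefact of its bucket indexing.
def Pre_organize_obstacles (obstacles : List (Int × Int)) : Prop :=
  obstacles ≠ [] ∧ ∀ p ∈ obstacles, 0 ≤ p.1 ∧ 0 ≤ p.2
instance (obstacles : List (Int × Int)) : Decidable (Pre_organize_obstacles obstacles) := by
  unfold Pre_organize_obstacles; infer_instance

def pvWitness_organize_obstacles : (List (Int × Int)) := [(0, 2), (1, 0), (0, 1)]

def Spec_organize_obstacles (obstacles : List (Int × Int)) (out : List (List Int) × List (List Int)) : Prop := out = organize_obstacles_alt obstacles
instance (obstacles : List (Int × Int)) (out : List (List Int) × List (List Int)) : Decidable (Spec_organize_obstacles obstacles out) := by unfold Spec_organize_obstacles; infer_instance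

-- ===== CLAIM (what is proved, stated in full; the proofs are below) =====
def Claim_equal_organize_obstacles : Prop := ∀ (obstacles : List (Int × Int)), Dom_organize_obstacles obstacles → Pre_organize_obstacles obstacles → Spec_organize_obstacles obstacles (organize_obstacles obstacles)

-- ===== LEMMAS AND PROOFS =====

-- the lexicographic ≤ on the projections (key, val): the order B's global sort realises
def lexR (key val : Int × Int → Int) (p q : Int × Int) : Prop :=
  key p < key q ∨ (key p = key q ∧ val p ≤ val q)

theorem lexR_trans (key val : Int × Int → Int) : Transitive (lexR key val) := by
  intro a b c hab hbc
  unfold lexR at *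
  rcases hab with h | ⟨h1, h2⟩ <;> rcases hbc with h' | ⟨h1', h2'⟩ <;> [left; left; left; right] <;> omega

theorem pairwise_insertBy {α : Type} (R : α → α → Prop) (before : α → α → Bool)
    (htrans : Transitive R)
    (h1 : ∀ a b, before a b = true → R a b) (h2 : ∀ a b, before a b = false → R b a)
    (x : α) (ys : List α) (hys : ys.Pairwise R) :
    (PySem.List.insertBy before x ys).Pairwise R := by
  induction ys with
  | nil => simp [PySem.List.insertBy]
  | cons y ys ih =>
    rcases List.pairwise_cons.mp hys with ⟨hy, hys'⟩
    by_cases hb : before x y = true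
    · rw [show PySem.List.insertBy before x (y :: ys) = x :: y :: ys by
        simp [PySem.List.insertBy, hb]]
      refine List.pairwise_cons.mpr ⟨?_, hys⟩
      intro z hz
      rcases List.mem_cons.mp hz with rfl | hz'
      · exact h1 _ _ hb
      · exact htrans (h1 _ _ hb) (hy _ hz')
    · rw [show PySem.List.insertBy before x (y :: ys) = y :: PySem.List.insertBy before x ys by
        simp [PySem.List.insertBy, hb]]
      refine List.pairwise_cons.mpr ⟨?_, ih hys'⟩
      intro z hz
      rcases (PySem.List.mem_insertBy before x z ys).mp hz with rfl | hz'
      · exact h2 _ _ (by simpa using hb)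
      · exact hy _ hz'

theorem pairwise_foldl_insertBy {α : Type} (R : α → α → Prop) (before : α → α → Bool)
    (htrans : Transitive R)
    (h1 : ∀ a b, before a b = true → R a b) (h2 : ∀ a b, before a b = false → R b a)
    (l : List α) (acc : List α) (hacc : acc.Pairwise R) :
    (l.foldl (fun acc x => PySem.List.insertBy before x acc) acc).Pairwise R := by
  induction l generalizing acc with
  | nil => simpa
  | cons p l ih => exact ih _ (pairwise_insertBy R before htrans h1 h2 p acc hacc)

theorem sorted2_pairwise_lexR (l : List (Int × Int)) (key val : Int × Int → Int) :
    (PySem.List.sorted2 l key val false).Pairwise (lexR key val) := by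
  have hdef : PySem.List.sorted2 l key val false
      = l.foldl (fun acc x => PySem.List.insertBy
          (fun a b => decide (key a < key b) || (!decide (key b < key a) && decide (val a < val b)))
          x acc) [] := rfl
  rw [hdef]
  refine pairwise_foldl_insertBy (lexR key val)
    (fun a b => decide (key a < key b) || (!decide (key b < key a) && decide (val a < val b)))
    (lexR_trans key val) ?_ ?_ l [] (by simp)
  · intro a b h
    simp only [Bool.or_eq_true, Bool.and_eq_true, decide_eq_true_eq, Bool.not_eq_true',
      decide_eq_false_iff_not] at h
    unfold lexR; omega
  · intro a b h
    simp only [Bool.or_eq_false_iff, Bool.and_eq_false_iff, decide_eq_true_eq,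
      decide_eq_false_iff_not, Bool.not_eq_false'] at h
    unfold lexR; omega

-- B side: each bucket of the dict is the (key = r)-fiber of the distributed list, in list order
theorem distribute_getD (pairs : List (Int × Int)) (key val : Int × Int → Int)
    (d : PySem.Dict Int (List Int)) (r : Int) :
    (pairs.foldl (fun d p => d.modify (key p) [] (fun l => l ++ [val p])) d).getD r []
      = d.getD r [] ++ (pairs.filter (fun p => decide (key p = r))).map val := by
  induction pairs generalizing d with
  | nil => simp
  | cons p t ih =>
    simp only [List.foldl_cons, ih, List.filter_cons]
    rw [PySem.Dict.getD_modify]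
    by_cases h : key p = r <;> simp [h, Ne.symm]

-- the fiber of the globally sorted list is the sorted fiber
theorem sorted2_fiber (l : List (Int × Int)) (key val : Int × Int → Int) (r : Int) :
    ((PySem.List.sorted2 l key val false).filter (fun p => decide (key p = r))).map val
      = PySem.List.sorted ((l.filter (fun p => decide (key p = r))).map val) (fun x => x) false := by
  refine (PySem.List.sorted_id_eq_of_perm_of_pairwise _ _ ?_ ?_).symm
  · exact ((PySem.List.sorted2_perm l key val false).filter _).map val
  · have hp := (sorted2_pairwise_lexR l key val).filter (fun p => decide (key p = r))
    have hp' : ((PySem.List.sorted2 l key val false).filter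
        (fun p => decide (key p = r))).Pairwise (fun a b => val a ≤ val b) := by
      refine List.Pairwise.imp_of_mem ?_ hp
      intro a b ha hb hR
      have ha' := (List.mem_filter.mp ha).2
      have hb' := (List.mem_filter.mp hb).2
      simp only [decide_eq_true_eq] at ha' hb'
      unfold lexR at hR
      rcases hR with h | ⟨_, h⟩ <;> omega
    exact List.Pairwise.map val (fun a b h => h) hp'

-- A side: pyAppendAt preserves length
theorem length_pyAppendAt (bs : List (List Int)) (i : Int) (x : Int) :
    (pyAppendAt bs i x).length = bs.length := by
  unfold pyAppendAt
  by_cases h : 0 ≤ (if i < 0 then i + (bs.length : Int) else i)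
      ∧ (if i < 0 then i + (bs.length : Int) else i) < (bs.length : Int)
  · simp only [if_pos h, List.length_modify]
  · simp only [if_neg h]

theorem length_foldl_append (l : List (Int × Int)) (key val : Int × Int → Int)
    (bs : List (List Int)) :
    (l.foldl (fun bs p => pyAppendAt bs (key p) (val p)) bs).length = bs.length := by
  induction l generalizing bs with
  | nil => rfl
  | cons p t ih => simp [List.foldl_cons, ih, length_pyAppendAt]

-- A side: the bucket at index i collects the (key = i)-fiber in input order
theorem foldl_append_getElem (l : List (Int × Int)) (key val : Int × Int → Int)
    (bs : List (List Int)) (hb : ∀ p ∈ l, 0 ≤ key p ∧ key p < bs.length)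
    (i : Nat) (hi : i < bs.length) :
    (l.foldl (fun bs p => pyAppendAt bs (key p) (val p)) bs)[i]'(by
        rw [length_foldl_append]; exact hi)
      = bs[i] ++ (l.filter (fun p => decide (key p = (i : Int)))).map val := by
  induction l generalizing bs with
  | nil => simp
  | cons p t ih =>
    rcases hb p (by simp) with ⟨h0, hlt⟩
    have hstep : pyAppendAt bs (key p) (val p) = bs.modify (key p).toNat (fun l => l ++ [val p]) := by
      unfold pyAppendAt
      have : ¬ key p < 0 := by omega
      simp only [this, if_false]
      rw [if_pos ⟨h0, hlt⟩]
    have hlen : (bs.modify (key p).toNat (fun l => l ++ [val p])).length = bs.length := by simp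
    simp only [List.foldl_cons, hstep]
    rw [ih (bs.modify (key p).toNat (fun l => l ++ [val p]))
        (by intro q hq; rw [hlen]; exact hb q (by simp [hq])) (by rw [hlen]; exact hi)]
    rw [List.getElem_modify]
    simp only [List.filter_cons]
    by_cases h : key p = (i : Int)
    · have : (key p).toNat = i := by omega
      simp [h, this, hi]
    · have : (key p).toNat ≠ i := by omega
      simp [h, this]

theorem length_pyRange_succ (m : Int) (h : 0 ≤ m) :
    (PySem.List.pyRange 0 (m + 1) 1).length = (m + 1).toNat := by
  simp only [PySem.List.pyRange]
  split <;> simp <;> omega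

-- A's single loop over the pair state splits into two independent folds
theorem foldl_pair_split (l : List (Int × Int)) (bs cs : List (List Int)) :
    l.foldl (fun st (p : Int × Int) => (pyAppendAt st.1 p.1 p.2, pyAppendAt st.2 p.2 p.1)) (bs, cs)
      = (l.foldl (fun bs p => pyAppendAt bs p.1 p.2) bs,
         l.foldl (fun cs p => pyAppendAt cs p.2 p.1) cs) := by
  induction l generalizing bs cs with
  | nil => rfl
  | cons p t ih => simp [List.foldl_cons, ih]

-- one component: A's populate-then-sort equals B's sort-then-distribute
theorem component_eq (l : List (Int × Int)) (key val : Int × Int → Int) (m : Int) (hm : 0 ≤ m)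
    (hb : ∀ p ∈ l, 0 ≤ key p ∧ key p ≤ m) :
    ((l.foldl (fun bs p => pyAppendAt bs (key p) (val p))
        ((PySem.List.pyRange 0 (m + 1) 1).map (fun _ => ([] : List Int)))).map
          (fun l => PySem.List.sorted l (fun x => x) false))
      = (PySem.List.pyRange 0 (m + 1) 1).map (fun r =>
          (distributeB (PySem.List.sorted2 l key val false) key val).getD r []) := by
  have hrl : (PySem.List.pyRange 0 (m + 1) 1).length = (m + 1).toNat :=
    length_pyRange_succ m hm
  have hlen0 : ((PySem.List.pyRange 0 (m + 1) 1).map (fun _ => ([] : List Int))).length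
      = (m + 1).toNat := by simp [hrl]
  apply List.ext_getElem
  · simp [length_foldl_append, hrl]
  · intro i h1 h2
    have hi : i < (m + 1).toNat := by
      simpa [length_foldl_append, hlen0] using h1
    have hib : i < ((PySem.List.pyRange 0 (m + 1) 1).map (fun _ => ([] : List Int))).length := by
      omega
    rw [List.getElem_map, List.getElem_map]
    rw [foldl_append_getElem l key val _ (by
        intro p hp
        rcases hb p hp with ⟨h0, hmle⟩
        rw [hlen0]
        omega) i hib]
    rw [List.getElem_map]
    simp only [List.nil_append]
    have hri : (PySem.List.pyRange 0 (m + 1) 1)[i]'(by omega) = (i : Int) := by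
      rw [PySem.List.getElem_pyRange_one]
      omega
    rw [hri]
    unfold distributeB
    rw [distribute_getD, PySem.Dict.getD_empty, List.nil_append]
    exact (sorted2_fiber l key val (i : Int)).symm

-- ===== VERDICT (by name: the statement is the Claim_ definition above) =====
theorem organize_obstacles_spec : Claim_equal_organize_obstacles := by
  intro obstacles _hdom hpre
  rcases hpre with ⟨hne, hnn⟩
  unfold Spec_organize_obstacles organize_obstacles organize_obstacles_alt
  rcases hr : PySem.List.max? (obstacles.map (fun p => p.1)) (fun x => x) with _ | mr
  · exact absurd (by simpa using (PySem.List.max?_eq_none_iff _ _).mp hr) hne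
  rcases hc : PySem.List.max? (obstacles.map (fun p => p.2)) (fun x => x) with _ | mc
  · exact absurd (by simpa using (PySem.List.max?_eq_none_iff _ _).mp hc) hne
  have hr' : ∀ p ∈ obstacles, 0 ≤ p.1 ∧ p.1 ≤ mr := by
    intro p hp
    exact ⟨(hnn p hp).1, PySem.List.max?_isMax hr p.1 (List.mem_map_of_mem hp)⟩
  have hc' : ∀ p ∈ obstacles, 0 ≤ p.2 ∧ p.2 ≤ mc := by
    intro p hp
    exact ⟨(hnn p hp).2, PySem.List.max?_isMax hc p.2 (List.mem_map_of_mem hp)⟩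
  have hmr : 0 ≤ mr := by
    rcases List.exists_mem_of_ne_nil obstacles hne with ⟨p, hp⟩
    have := hr' p hp; omega
  have hmc : 0 ≤ mc := by
    rcases List.exists_mem_of_ne_nil obstacles hne with ⟨p, hp⟩
    have := hc' p hp; omega
  simp only [hr, hc, foldl_pair_split]
  refine Prod.ext ?_ ?_
  · exact component_eq obstacles (fun p => p.1) (fun p => p.2) mr hmr hr'
  · exact component_eq obstacles (fun p => p.2) (fun p => p.1) mc hmc hc'
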